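-- pv_equiv track=rewrite | github.com/matt-gardner/bilm-tf | make_space_dataset.py | truncate_tokens
-- ===== SOURCE A (Python) =====
-- from typing import List
--
-- max_sentence_length = 40
--
-- def truncate_tokens(tokens: List[str]) -> List[str]:
--     current_length = 0
--     index = 0
--     kept_tokens = []
--     while current_length < max_sentence_length and index < len(tokens):
--         kept_tokens.append(tokens[index])
--         current_length += len(tokens[index])
--         index += 1
--     return kept_tokens
-- ===== SOURCE B (Python) =====
-- from typing import List
-- from itertools import accumulate
--
-- max_sentence_length = 40
--
-- def truncate_tokens(tokens: List[str]) -> List[str]: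
--     # cumulative length BEFORE each token; non-decreasing since lengths are >= 0
--     befores = [0] + list(accumulate(len(t) for t in tokens))[:-1]
--     return [t for t, b in zip(tokens, befores) if b < max_sentence_length]
-- ===== Notes on version B (the rewrite author's own statement) =====
-- stated objective: alternative
-- what changed: Replaces the early-exit index/accumulator while-loop with a prefix-sum table (itertools.accumulate) of cumulative lengths before each token, then keeps the tokens whose before-value is < max_sentence_length.
import Mathlib
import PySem

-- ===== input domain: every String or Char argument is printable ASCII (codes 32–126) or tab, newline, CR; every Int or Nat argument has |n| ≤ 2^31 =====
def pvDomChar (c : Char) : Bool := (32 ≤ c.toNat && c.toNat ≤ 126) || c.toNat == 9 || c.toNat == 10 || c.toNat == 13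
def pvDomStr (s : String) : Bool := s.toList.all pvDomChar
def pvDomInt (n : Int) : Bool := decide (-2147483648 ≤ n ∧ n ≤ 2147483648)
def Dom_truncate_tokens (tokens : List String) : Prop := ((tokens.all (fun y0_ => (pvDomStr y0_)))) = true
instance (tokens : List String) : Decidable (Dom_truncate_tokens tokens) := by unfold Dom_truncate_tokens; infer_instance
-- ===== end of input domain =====

-- B replaces A's early-exit while-loop with a prefix-sum table of cumulative lengths
-- before each token followed by a filtering pass (alternative decomposition, same cost).


-- ===== PORT A =====
-- while current_length < 40 and index < len(tokens): append tokens[index]; advance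
def truncateLoop (current_length : Int) (rest : List String) : List String :=
  match rest with
  | [] => []
  | t :: ts =>
      if current_length < 40 then t :: truncateLoop (current_length + PySem.Str.len t) ts
      else []

def truncate_tokens (tokens : List String) : List String :=
  truncateLoop 0 tokens

-- ===== PORT B =====
-- befores = [0] + list(accumulate(len(t) for t in tokens))[:-1]
-- return [t for t, b in zip(tokens, befores) if b < 40]
def truncate_tokens_alt (tokens : List String) : List String :=
  let befores : List Int :=
    0 :: (((tokens.map PySem.Str.len).scanl (· + ·) 0).tail).dropLast
  ((tokens.zip befores).filter (fun p => p.2 < 40)).map Prod.fst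

-- ===== PRECONDITION & SPEC =====
def Spec_truncate_tokens (tokens : List String) (out : List String) : Prop := out = truncate_tokens_alt tokens
instance (tokens : List String) (out : List String) : Decidable (Spec_truncate_tokens tokens out) := by unfold Spec_truncate_tokens; infer_instance

-- ===== CLAIM (what is proved, stated in full; the proofs are below) =====
def Claim_equal_truncate_tokens : Prop := ∀ (tokens : List String), Dom_truncate_tokens tokens → Spec_truncate_tokens tokens (truncate_tokens tokens)

-- ===== LEMMAS AND PROOFS =====

theorem scanl_ne_nil {α β : Type} (f : β → α → β) (b : β) (l : List α) :
    l.scanl f b ≠ [] := by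
  intro h
  have := congrArg List.length h
  simp [List.length_scanl] at this

theorem strLen_nonneg (s : String) : 0 ≤ PySem.Str.len s := by
  simp [PySem.Str.len_eq]

-- once the running total has reached 40, the filter keeps nothing
theorem filter_scanl_ge (ts : List String) (c : Int) (h : 40 ≤ c) :
    ((ts.zip (((ts.map PySem.Str.len).scanl (· + ·) c).dropLast)).filter
        (fun p => decide (p.2 < 40))) = [] := by
  induction ts generalizing c with
  | nil => simp
  | cons t ts ih =>
      simp only [List.map_cons, List.scanl_cons]
      rw [List.dropLast_cons_of_ne_nil (scanl_ne_nil _ _ _)]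
      simp only [List.zip_cons_cons, List.filter_cons]
      have : ¬ (c < 40) := by omega
      simp only [this, decide_false]
      exact ih (c + PySem.Str.len t) (le_trans h (by have := strLen_nonneg t; omega))

theorem loop_eq_filter (ts : List String) (c : Int) :
    truncateLoop c ts =
      ((ts.zip (((ts.map PySem.Str.len).scanl (· + ·) c).dropLast)).filter
          (fun p => decide (p.2 < 40))).map Prod.fst := by
  induction ts generalizing c with
  | nil => simp [truncateLoop]
  | cons t ts ih =>
      simp only [List.map_cons, List.scanl_cons]
      rw [List.dropLast_cons_of_ne_nil (scanl_ne_nil _ _ _)]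
      simp only [List.zip_cons_cons, List.filter_cons, truncateLoop]
      by_cases h : c < 40
      · simp only [h, if_true, decide_true, List.map_cons, ih (c + PySem.Str.len t)]
      · simp only [h, if_false, decide_false, Bool.false_eq_true]
        rw [filter_scanl_ge ts (c + PySem.Str.len t)
          (by have := strLen_nonneg t; omega)]
        simp

-- the tail-with-leading-zero shape of B's befores equals the plain scanl prefix table
-- for nonempty input, B's [0]+accumulate[:-1] table equals the plain scanl prefix table
theorem befores_shape (t : String) (ts : List String) :
    (0 : Int) :: ((((t :: ts).map PySem.Str.len).scanl (· + ·) 0).tail).dropLast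
      = (((t :: ts).map PySem.Str.len).scanl (· + ·) 0).dropLast := by
  simp only [List.map_cons, List.scanl_cons, List.tail_cons]
  rw [List.dropLast_cons_of_ne_nil (scanl_ne_nil _ _ _)]

-- ===== VERDICT (by name: the statement is the Claim_ definition above) =====
theorem truncate_tokens_spec : Claim_equal_truncate_tokens := by
  intro tokens _
  unfold Spec_truncate_tokens truncate_tokens truncate_tokens_alt
  cases tokens with
  | nil => rfl
  | cons t ts => rw [befores_shape, loop_eq_filter]
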